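-- pv_equiv track=rewrite | github.com/Gene-Weaver/LeafMachine2 | leafmachine2/segmentation/detectron2/segment_utils.py | get_string_indices
-- ===== SOURCE A (Python) =====
-- def get_string_indices(strings):
--     leaf_strings = [s for s in strings if s.startswith('leaf')]
--     petiole_strings = [s for s in strings if s.startswith('petiole')]
--     hole_strings = [s for s in strings if s.startswith('hole')]
--
--     if len(leaf_strings) > 0:
--         leaf_value = max([int(s.split(' ')[1].replace('%','')) for s in leaf_strings])
--         leaf_index = strings.index([s for s in leaf_strings if int(s.split(' ')[1].replace('%','')) == leaf_value][0])
--     else: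
--         leaf_index = None
--
--     if len(petiole_strings) > 0:
--         petiole_value = max([int(s.split(' ')[1].replace('%','')) for s in petiole_strings])
--         petiole_index = strings.index([s for s in petiole_strings if int(s.split(' ')[1].replace('%','')) == petiole_value][0])
--     else:
--         petiole_index = None
--
--     if len(hole_strings) > 0:
--         hole_indices = [i for i, s in enumerate(strings) if s.startswith('hole')]
--     else:
--         hole_indices = None
--
--     return leaf_index, petiole_index, hole_indices
-- ===== SOURCE B (Python) =====
-- def get_string_indices(strings):
--     best_leaf = None      # (value, index) of first maximal leaf
--     best_petiole = None   # (value, index) of first maximal petiole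
--     hole_indices = []
--     for i, s in enumerate(strings):
--         if s.startswith('leaf'):
--             v = int(s.split(' ')[1].replace('%', ''))
--             if best_leaf is None or v > best_leaf[0]:
--                 best_leaf = (v, i)
--         elif s.startswith('petiole'):
--             v = int(s.split(' ')[1].replace('%', ''))
--             if best_petiole is None or v > best_petiole[0]:
--                 best_petiole = (v, i)
--         elif s.startswith('hole'):
--             hole_indices.append(i)
--     return (None if best_leaf is None else best_leaf[1],
--             None if best_petiole is None else best_petiole[1],
--             hole_indices if hole_indices else None)
-- ===== Notes on version B (the rewrite author's own statement) =====
-- stated objective: alternative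
-- what changed: A makes six passes (three filters, two max-then-filter-then-list.index scans, one enumerate scan); B is a single pass over enumerate(strings) maintaining (value, index) of the first maximal leaf and petiole plus the hole-index list, with strict '>' preserving first-occurrence tie-breaking.
import Mathlib
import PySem

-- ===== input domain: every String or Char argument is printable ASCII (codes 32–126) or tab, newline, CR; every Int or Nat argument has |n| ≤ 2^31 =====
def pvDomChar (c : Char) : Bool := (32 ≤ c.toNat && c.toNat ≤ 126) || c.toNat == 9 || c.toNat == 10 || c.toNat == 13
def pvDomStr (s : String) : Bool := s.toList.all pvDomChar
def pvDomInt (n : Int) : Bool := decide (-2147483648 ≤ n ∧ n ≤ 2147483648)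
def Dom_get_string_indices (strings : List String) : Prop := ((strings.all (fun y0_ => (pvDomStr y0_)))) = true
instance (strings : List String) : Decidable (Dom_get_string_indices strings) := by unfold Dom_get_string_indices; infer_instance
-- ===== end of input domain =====

-- B replaces A's six list passes (three filters, two max+filter+index scans, one enumerate scan)
-- by a single pass over enumerate(strings) keeping (value, index) of the first maximal leaf and
-- petiole plus the hole indices; objective: alternative decomposition, same results.

-- ===== PORT A =====
-- shared helper: the expression int(s.split(' ')[1].replace('%','')) both programs evaluate;
-- none exactly where Python raises IndexError/ValueError (excluded by Pre_)
def pvParse (s : String) : Option Int :=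
  match PySem.Str.split? s " " with
  | none => none
  | some parts =>
      match PySem.List.pyGet? parts 1 with
      | none => none
      | some t => PySem.Int.ofStr? (PySem.Str.replace t "%" "")

-- total reading of pvParse used inside the ports; Pre_ guarantees it is only read where it is some
def pvVal (s : String) : Int := (pvParse s).getD 0

def get_string_indices (strings : List String) : Option Int × Option Int × Option (List Int) :=
  let leaf_strings := strings.filter (fun s => PySem.Str.startswith s "leaf")
  let petiole_strings := strings.filter (fun s => PySem.Str.startswith s "petiole")
  let hole_strings := strings.filter (fun s => PySem.Str.startswith s "hole")
  let leaf_index : Option Int :=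
    if leaf_strings.length > 0 then
      let leaf_value := (PySem.List.max? (leaf_strings.map (fun s => pvVal s)) (fun x => x)).getD 0
      match leaf_strings.filter (fun s => pvVal s == leaf_value) with
      | [] => none          -- unreachable: the maximum is attained
      | c :: _ => (PySem.List.index? strings c).map (fun n : Nat => (n : Int))
    else none
  let petiole_index : Option Int :=
    if petiole_strings.length > 0 then
      let petiole_value := (PySem.List.max? (petiole_strings.map (fun s => pvVal s)) (fun x => x)).getD 0
      match petiole_strings.filter (fun s => pvVal s == petiole_value) with
      | [] => none          -- unreachable: the maximum is attained
      | c :: _ => (PySem.List.index? strings c).map (fun n : Nat => (n : Int))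
    else none
  let hole_indices : Option (List Int) :=
    if hole_strings.length > 0 then
      some (((PySem.List.enumerate strings 0).filter (fun q => PySem.Str.startswith q.2 "hole")).map (fun q => q.1))
    else none
  (leaf_index, petiole_index, hole_indices)

-- ===== PORT B =====
-- 'if best is None or v > best[0]: best = (v, i)'
def pvStepBest (b : Option (Int × Int)) (v i : Int) : Option (Int × Int) :=
  match b with
  | none => some (v, i)
  | some bb => if v > bb.1 then some (v, i) else some bb

-- the body of B's single for-loop (elif chain)
def pvStep (acc : Option (Int × Int) × Option (Int × Int) × List Int) (q : Int × String) :
    Option (Int × Int) × Option (Int × Int) × List Int :=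
  if PySem.Str.startswith q.2 "leaf" then
    (pvStepBest acc.1 (pvVal q.2) q.1, acc.2.1, acc.2.2)
  else if PySem.Str.startswith q.2 "petiole" then
    (acc.1, pvStepBest acc.2.1 (pvVal q.2) q.1, acc.2.2)
  else if PySem.Str.startswith q.2 "hole" then
    (acc.1, acc.2.1, acc.2.2 ++ [q.1])
  else acc

def get_string_indices_alt (strings : List String) : Option Int × Option Int × Option (List Int) :=
  let st := (PySem.List.enumerate strings 0).foldl pvStep (none, none, [])
  (st.1.map (fun b => b.2), st.2.1.map (fun b => b.2),
   if st.2.2 = [] then none else some st.2.2)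

-- ===== PRECONDITION & SPEC =====
-- Pre_ excludes exactly the inputs where Python raises: a string starting with 'leaf' or
-- 'petiole' whose second space-field (with '%' removed) is not a valid int literal
-- (IndexError/ValueError in both A and B).
def Pre_get_string_indices (strings : List String) : Prop :=
  ∀ s ∈ strings,
    (PySem.Str.startswith s "leaf" || PySem.Str.startswith s "petiole") = true →
    (pvParse s).isSome = true
instance (strings : List String) : Decidable (Pre_get_string_indices strings) := by
  unfold Pre_get_string_indices; infer_instance

def pvWitness_get_string_indices : List String :=
  ["leaf 10%", "hole", "petiole 5%", "leaf 10%", "flower"]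

def Spec_get_string_indices (strings : List String) (out : Option Int × Option Int × Option (List Int)) : Prop := out = get_string_indices_alt strings
instance (strings : List String) (out : Option Int × Option Int × Option (List Int)) : Decidable (Spec_get_string_indices strings out) := by unfold Spec_get_string_indices; infer_instance

-- ===== CLAIM (what is proved, stated in full; the proofs are below) =====
def Claim_equal_get_string_indices : Prop := ∀ (strings : List String), Dom_get_string_indices strings → Pre_get_string_indices strings → Spec_get_string_indices strings (get_string_indices strings)

-- ===== LEMMAS AND PROOFS =====

-- abbreviations for the three prefix tests
def pvL : String → Bool := fun s => PySem.Str.startswith s "leaf"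
def pvP : String → Bool := fun s => PySem.Str.startswith s "petiole"
def pvH : String → Bool := fun s => PySem.Str.startswith s "hole"

-- the (value, first index) of the maximal p-string of l, indices starting at i (B's loop, suffix form)
def pvBestOf (p : String → Bool) : List String → Int → Option (Int × Int)
  | [], _ => none
  | s :: r, i =>
      let rest := pvBestOf p r (i + 1)
      if p s then
        match rest with
        | none => some (pvVal s, i)
        | some rr => if rr.1 > pvVal s then some rr else some (pvVal s, i)
      else rest

def pvHoleIdxs : List String → Int → List Int
  | [], _ => []
  | s :: r, i => if pvH s then i :: pvHoleIdxs r (i + 1) else pvHoleIdxs r (i + 1)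

def pvCombine (b r : Option (Int × Int)) : Option (Int × Int) :=
  match b with
  | none => r
  | some bb =>
      match r with
      | none => some bb
      | some rr => if rr.1 > bb.1 then some rr else some bb

-- A's max value and A's chosen index (in Nat), parametric in the prefix test
def pvMval (p : String → Bool) (l : List String) : Int :=
  (PySem.List.max? ((l.filter p).map (fun s => pvVal s)) (fun x => x)).getD 0

def pvABest (p : String → Bool) (l : List String) : Option Nat :=
  if (l.filter p).length > 0 then
    match (l.filter p).filter (fun s => pvVal s == pvMval p l) with
    | [] => none
    | c :: _ => PySem.List.index? l c
  else none

-- distinct literal prefixes are mutually exclusive (their first characters differ)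
theorem pv_not_both (s : String) (a b : List Char) (c d : Char) (t u : List Char)
    (ha : a = c :: t) (hb : b = d :: u) (hcd : c ≠ d)
    (h1 : PySem.Chars.startswith s.toList a = true) :
    PySem.Chars.startswith s.toList b = false := by
  subst ha hb
  rw [PySem.Chars.startswith_iff] at h1
  cases hb2 : PySem.Chars.startswith s.toList (d :: u) with
  | false => rfl
  | true =>
    rw [PySem.Chars.startswith_iff] at hb2
    obtain ⟨t1, e1⟩ := h1
    obtain ⟨t2, e2⟩ := hb2
    rw [← e1] at e2
    simp at e2
    exact absurd e2.1.symm hcd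

theorem pvL_not_P (s : String) (h : pvL s = true) : pvP s = false := by
  unfold pvL at h; unfold pvP
  rw [PySem.Str.startswith_eq] at h ⊢
  exact pv_not_both s "leaf".toList "petiole".toList 'l' 'p' ['e','a','f'] ['e','t','i','o','l','e'] rfl rfl (by decide) h

theorem pvL_not_H (s : String) (h : pvL s = true) : pvH s = false := by
  unfold pvL at h; unfold pvH
  rw [PySem.Str.startswith_eq] at h ⊢
  exact pv_not_both s "leaf".toList "hole".toList 'l' 'h' ['e','a','f'] ['o','l','e'] rfl rfl (by decide) h

theorem pvP_not_H (s : String) (h : pvP s = true) : pvH s = false := by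
  unfold pvP at h; unfold pvH
  rw [PySem.Str.startswith_eq] at h ⊢
  exact pv_not_both s "petiole".toList "hole".toList 'p' 'h' ['e','t','i','o','l','e'] ['o','l','e'] rfl rfl (by decide) h

theorem pvCombine_none (r : Option (Int × Int)) : pvCombine none r = r := rfl

theorem pvCombine_step (b r : Option (Int × Int)) (v i : Int) :
    pvCombine (pvStepBest b v i) r
      = pvCombine b
          (match r with
           | none => some (v, i)
           | some rr => if rr.1 > v then some rr else some (v, i)) := by
  rcases b with _ | ⟨bv, bi⟩ <;> rcases r with _ | ⟨rv, ri⟩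
  · rfl
  · by_cases h2 : rv > v <;> simp [pvStepBest, pvCombine, h2]
  · by_cases h1 : v > bv <;> simp [pvStepBest, pvCombine, h1]
  · by_cases h1 : v > bv <;> by_cases h2 : rv > v <;> by_cases h3 : rv > bv <;>
      simp [pvStepBest, pvCombine, h1, h2, h3] <;> omega

theorem pvFold_eq (l : List String) : ∀ (i : Int) bl bp hs,
    (PySem.List.enumerate l i).foldl pvStep (bl, bp, hs)
      = (pvCombine bl (pvBestOf pvL l i), pvCombine bp (pvBestOf pvP l i),
         hs ++ pvHoleIdxs l i) := by
  induction l with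
  | nil =>
    intro i bl bp hs
    rcases bl with _ | bb <;> rcases bp with _ | pb <;>
      simp [PySem.List.enumerate, pvBestOf, pvHoleIdxs, pvCombine]
  | cons s r ih =>
    intro i bl bp hs
    rw [PySem.List.enumerate_cons, List.foldl_cons, ih]
    by_cases hl : pvL s
    · have hp := pvL_not_P s hl
      have hh := pvL_not_H s hl
      have hl' : PySem.Str.startswith s "leaf" = true := hl
      simp only [pvStep, hl', if_true]
      simp only [Prod.mk.injEq]
      refine ⟨?_, ?_, ?_⟩
      · rw [pvCombine_step]
        congr 1
        simp [pvBestOf, hl]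
      · congr 1
        simp [pvBestOf, hp]
      · simp [pvHoleIdxs, hh]
    · by_cases hp : pvP s
      · have hh := pvP_not_H s hp
        have hl' : PySem.Str.startswith s "leaf" = false := by simpa [pvL] using hl
        have hp' : PySem.Str.startswith s "petiole" = true := hp
        simp only [pvStep, hl', hp', if_true, Bool.false_eq_true, if_false]
        simp only [Prod.mk.injEq]
        refine ⟨?_, ?_, ?_⟩
        · congr 1
          simp [pvBestOf, hl]
        · rw [pvCombine_step]
          congr 1
          simp [pvBestOf, hp]
        · simp [pvHoleIdxs, hh]
      · have hl' : PySem.Str.startswith s "leaf" = false := by simpa [pvL] using hl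
        have hp' : PySem.Str.startswith s "petiole" = false := by simpa [pvP] using hp
        by_cases hh : pvH s
        · have hh' : PySem.Str.startswith s "hole" = true := hh
          simp only [pvStep, hl', hp', hh', if_true, Bool.false_eq_true, if_false]
          simp only [Prod.mk.injEq]
          refine ⟨?_, ?_, ?_⟩
          · congr 1
            simp [pvBestOf, hl]
          · congr 1
            simp [pvBestOf, hp]
          · simp [pvHoleIdxs, hh, List.append_assoc]
        · have hh' : PySem.Str.startswith s "hole" = false := by simpa [pvH] using hh
          simp only [pvStep, hl', hp', hh', Bool.false_eq_true, if_false]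
          simp only [Prod.mk.injEq]
          refine ⟨?_, ?_, ?_⟩
          · congr 1
            simp [pvBestOf, hl]
          · congr 1
            simp [pvBestOf, hp]
          · simp [pvHoleIdxs, hh]

theorem pvHoleIdxs_eq_enum (l : List String) : ∀ (i : Int),
    ((PySem.List.enumerate l i).filter (fun q => PySem.Str.startswith q.2 "hole")).map (fun q => q.1)
      = pvHoleIdxs l i := by
  induction l with
  | nil => intro i; simp [PySem.List.enumerate, pvHoleIdxs]
  | cons s r ih =>
    intro i
    rw [PySem.List.enumerate_cons]
    by_cases hh : PySem.Chars.startswith s.toList ['h', 'o', 'l', 'e'] = true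
    · simp [pvHoleIdxs, pvH, hh]
      simpa using ih (i + 1)
    · simp [pvHoleIdxs, pvH, hh]
      simpa using ih (i + 1)

theorem pvHoleIdxs_nil_iff (l : List String) : ∀ (i : Int),
    (pvHoleIdxs l i = [] ↔ l.filter pvH = []) := by
  induction l with
  | nil => intro i; simp [pvHoleIdxs]
  | cons s r ih =>
    intro i
    by_cases hh : pvH s
    · simp [pvHoleIdxs, hh]
    · simp [pvHoleIdxs, hh, ih]

theorem pv_foldl_max_comm (t : List Int) : ∀ (x y : Int),
    t.foldl max (max x y) = max x (t.foldl max y) := by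
  induction t with
  | nil => intro x y; simp
  | cons a t ih =>
    intro x y
    simp only [List.foldl_cons]
    rw [max_assoc, ih]

theorem pvMax_attained (p : String → Bool) (l : List String) (h : l.filter p ≠ []) :
    ∃ c, c ∈ l.filter p ∧ pvVal c = pvMval p l := by
  obtain ⟨m, hm⟩ : ∃ m, PySem.List.max? ((l.filter p).map (fun s => pvVal s)) (fun x => x) = some m := by
    cases hx : PySem.List.max? ((l.filter p).map (fun s => pvVal s)) (fun x => x) with
    | none =>
      rw [PySem.List.max?_eq_none_iff] at hx
      simp only [List.map_eq_nil_iff] at hx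
      exact absurd hx h
    | some m => exact ⟨m, rfl⟩
  have hmem := PySem.List.max?_mem hm
  rw [List.mem_map] at hmem
  obtain ⟨c, hc, hv⟩ := hmem
  exact ⟨c, hc, by rw [pvMval, hm, hv]; rfl⟩

theorem pvFilterMax_ne_nil (p : String → Bool) (l : List String) (h : l.filter p ≠ []) :
    (l.filter p).filter (fun s => pvVal s == pvMval p l) ≠ [] := by
  obtain ⟨c, hc, hv⟩ := pvMax_attained p l h
  intro hnil
  have hcmem : c ∈ (l.filter p).filter (fun s => pvVal s == pvMval p l) :=
    List.mem_filter.mpr ⟨hc, by simp [hv]⟩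
  rw [hnil] at hcmem
  simp at hcmem

theorem pvABest_empty (p : String → Bool) (l : List String) (h : l.filter p = []) :
    pvABest p l = none := by
  unfold pvABest
  simp [h]

theorem pvABest_pos (p : String → Bool) (l : List String) (c : String) (tl : List String)
    (h : 0 < (l.filter p).length)
    (hm : (l.filter p).filter (fun s => pvVal s == pvMval p l) = c :: tl) :
    pvABest p l = PySem.List.index? l c := by
  unfold pvABest
  rw [if_pos h, hm]

-- main characterisation: B's running best equals A's max-then-first-index computation
theorem pvBestOf_eq (p : String → Bool) (l : List String) : ∀ (i : Int),
    pvBestOf p l i = (pvABest p l).map (fun n : Nat => (pvMval p l, i + (n : Int))) := by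
  induction l with
  | nil => intro i; simp [pvBestOf, pvABest]
  | cons s r ih =>
    intro i
    by_cases hp : p s
    · have hfil : (s :: r).filter p = s :: r.filter p := by simp [hp]
      by_cases hemp : r.filter p = []
      · have hrest : pvBestOf p r (i + 1) = none := by
          rw [ih, pvABest_empty p r hemp]; rfl
        have hm : pvMval p (s :: r) = pvVal s := by
          unfold pvMval; rw [hfil, hemp]; simp [PySem.List.max?_id_cons]
        have hfc : ((s :: r).filter p).filter (fun x => pvVal x == pvMval p (s :: r)) = s :: [] := by
          rw [hm, hfil, hemp]; simp
        rw [show pvBestOf p (s :: r) i = some (pvVal s, i) from by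
          simp [pvBestOf, hp, hrest]]
        rw [pvABest_pos p (s :: r) s [] (by rw [hfil]; simp) hfc,
          PySem.List.index?_cons_self]
        simp [hm]
      · obtain ⟨c0, tl, hmatch⟩ :
            ∃ c0 tl, (r.filter p).filter (fun x => pvVal x == pvMval p r) = c0 :: tl := by
          cases hx : (r.filter p).filter (fun x => pvVal x == pvMval p r) with
          | nil => exact absurd hx (pvFilterMax_ne_nil p r hemp)
          | cons c0 tl => exact ⟨c0, tl, rfl⟩
        have hc0mem : c0 ∈ (r.filter p).filter (fun x => pvVal x == pvMval p r) := by
          rw [hmatch]; exact List.mem_cons_self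
        have hc0fil : c0 ∈ r.filter p := List.mem_of_mem_filter hc0mem
        have hc0v : pvVal c0 = pvMval p r := by
          have := (List.mem_filter.mp hc0mem).2
          simpa using this
        have hc0l : c0 ∈ r := List.mem_of_mem_filter hc0fil
        obtain ⟨n', hn'⟩ : ∃ n', PySem.List.index? r c0 = some n' := by
          have := (PySem.List.index?_isSome_iff (xs := r) (v := c0)).mpr hc0l
          exact Option.isSome_iff_exists.mp this
        have hlen : 0 < (r.filter p).length := List.length_pos_iff.mpr hemp
        have haB : pvABest p r = some n' := by
          rw [pvABest_pos p r c0 tl hlen hmatch, hn']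
        have hrest : pvBestOf p r (i + 1) = some (pvMval p r, (i + 1) + (n' : Int)) := by
          rw [ih, haB]
          rfl
        have hmax : pvMval p (s :: r) = max (pvVal s) (pvMval p r) := by
          unfold pvMval
          rw [hfil]
          cases hfe : r.filter p with
          | nil => exact absurd hfe hemp
          | cons d ds =>
            rw [List.map_cons, PySem.List.max?_id_cons, List.map_cons, List.foldl_cons,
              pv_foldl_max_comm, PySem.List.max?_id_cons]
            simp
        rcases lt_or_ge (pvVal s) (pvMval p r) with hlt | hle
        · have hbo : pvBestOf p (s :: r) i = some (pvMval p r, (i + 1) + (n' : Int)) := by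
            simp [pvBestOf, hp, hrest, hlt]
          have hmm : pvMval p (s :: r) = pvMval p r := by
            rw [hmax]; exact max_eq_right hlt.le
          have hsv : (pvVal s == pvMval p r) = false := by
            simp only [beq_eq_false_iff_ne, ne_eq]
            omega
          have hne : s ≠ c0 := by
            intro e
            rw [← e] at hc0v
            omega
          have hfc : ((s :: r).filter p).filter (fun x => pvVal x == pvMval p (s :: r))
              = c0 :: tl := by
            rw [hmm, hfil, List.filter_cons_of_neg (by simp [hsv])]
            exact hmatch
          rw [hbo, pvABest_pos p (s :: r) c0 tl (by rw [hfil]; simp) hfc,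
            PySem.List.index?_cons_of_ne r hne, hn']
          simp only [Option.map_some, Option.some.injEq, Prod.mk.injEq]
          refine ⟨hmm.symm, by push_cast; omega⟩
        · have hbo : pvBestOf p (s :: r) i = some (pvVal s, i) := by
            simp only [pvBestOf, hp, if_true, hrest]
            rw [if_neg (by omega)]
          have hmm : pvMval p (s :: r) = pvVal s := by
            rw [hmax]; exact max_eq_left hle
          have hfc : ((s :: r).filter p).filter (fun x => pvVal x == pvMval p (s :: r))
              = s :: (r.filter p).filter (fun x => pvVal x == pvVal s) := by
            rw [hmm, hfil, List.filter_cons_of_pos (by simp)]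
          rw [hbo, pvABest_pos p (s :: r) s _ (by rw [hfil]; simp) hfc,
            PySem.List.index?_cons_self]
          simp [hmm]
    · have hfil : (s :: r).filter p = r.filter p := by simp [hp]
      have hm : pvMval p (s :: r) = pvMval p r := by simp [pvMval, hfil]
      rw [show pvBestOf p (s :: r) i = pvBestOf p r (i + 1) from by simp [pvBestOf, hp], ih]
      by_cases hemp : r.filter p = []
      · rw [pvABest_empty p r hemp, pvABest_empty p (s :: r) (by rw [hfil]; exact hemp)]
        rfl
      · obtain ⟨c0, tl, hmatch⟩ :
            ∃ c0 tl, (r.filter p).filter (fun x => pvVal x == pvMval p r) = c0 :: tl := by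
          cases hx : (r.filter p).filter (fun x => pvVal x == pvMval p r) with
          | nil => exact absurd hx (pvFilterMax_ne_nil p r hemp)
          | cons c0 tl => exact ⟨c0, tl, rfl⟩
        have hc0p : p c0 = true :=
          (List.mem_filter.mp (List.mem_of_mem_filter (by
            rw [hmatch]; exact List.mem_cons_self))).2
        have hne : s ≠ c0 := by
          intro e
          rw [← e] at hc0p
          simp [hc0p] at hp
        have hlen : 0 < (r.filter p).length := List.length_pos_iff.mpr hemp
        have hfc : ((s :: r).filter p).filter (fun x => pvVal x == pvMval p (s :: r))
            = c0 :: tl := by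
          rw [hm, hfil]
          exact hmatch
        rw [pvABest_pos p r c0 tl hlen hmatch,
          pvABest_pos p (s :: r) c0 tl (by rw [hfil]; exact hlen) hfc,
          PySem.List.index?_cons_of_ne r hne]
        cases PySem.List.index? r c0 with
        | none => rfl
        | some n =>
          simp only [Option.map_some, Option.some.injEq, Prod.mk.injEq]
          refine ⟨hm.symm, by push_cast; omega⟩

theorem pvA_comp (p : String → Bool) (l : List String) :
    (if (l.filter p).length > 0 then
       match (l.filter p).filter (fun s =>
           pvVal s == (PySem.List.max? ((l.filter p).map (fun s => pvVal s)) (fun x => x)).getD 0) with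
       | [] => none
       | c :: _ => (PySem.List.index? l c).map (fun n : Nat => (n : Int))
     else none)
      = (pvABest p l).map (fun n : Nat => (n : Int)) := by
  by_cases hemp : l.filter p = []
  · rw [pvABest_empty p l hemp]
    simp [hemp]
  · have hlen : 0 < (l.filter p).length := List.length_pos_iff.mpr hemp
    rw [if_pos hlen]
    rw [show ((PySem.List.max? ((l.filter p).map (fun s => pvVal s)) (fun x => x)).getD 0)
        = pvMval p l from rfl]
    cases hmatch : (l.filter p).filter (fun s => pvVal s == pvMval p l) with
    | nil => exact absurd hmatch (pvFilterMax_ne_nil p l hemp)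
    | cons c tl =>
      rw [pvABest_pos p l c tl hlen hmatch]

-- ===== VERDICT (by name: the statement is the Claim_ definition above) =====
theorem get_string_indices_spec : Claim_equal_get_string_indices := by
  intro strings _ _
  unfold Spec_get_string_indices
  show get_string_indices strings = get_string_indices_alt strings
  unfold get_string_indices get_string_indices_alt
  rw [pvFold_eq]
  simp only [pvCombine_none, List.nil_append]
  rw [pvBestOf_eq pvL strings 0, pvBestOf_eq pvP strings 0]
  simp only [show (fun s => PySem.Str.startswith s "leaf") = pvL from rfl,
    show (fun s => PySem.Str.startswith s "petiole") = pvP from rfl,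
    show (fun s => PySem.Str.startswith s "hole") = pvH from rfl]
  refine congrArg₂ Prod.mk ?_ (congrArg₂ Prod.mk ?_ ?_)
  · rw [pvA_comp pvL strings]
    cases pvABest pvL strings <;> simp
  · rw [pvA_comp pvP strings]
    cases pvABest pvP strings <;> simp
  · rw [pvHoleIdxs_eq_enum strings 0]
    by_cases hemp : strings.filter pvH = []
    · rw [(pvHoleIdxs_nil_iff strings 0).mpr hemp, hemp]
      simp
    · rw [if_neg ((not_iff_not.mpr (pvHoleIdxs_nil_iff strings 0)).mpr hemp),
        if_pos (List.length_pos_iff.mpr hemp)]
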